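-- pv_equiv track=rewrite | github.com/dlgksqls/python_java_algorithm | 프로그래머스/unrated/134240. 푸드 파이트 대회/푸드 파이트 대회.py | solution
-- ===== SOURCE A (Python) =====
-- def solution(food):
--     answer_1 = ''
--     answer_2 = []
--
--     for i in range(1,len(food)):
--         for j in range(food[i] // 2):
--             answer_1 += str(i)
--
--     answer_2 = list(answer_1)
--     answer_1 += str(0)
--     answer_2.sort(reverse = True)
--     answer_2 = ''.join(answer_2)
--
--     answer_1 += answer_2
--
--     return answer_1
-- ===== SOURCE B (Python) =====
-- def solution(food):
--     # Counting sort over the 10 digit characters instead of a comparison sort.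
--     parts = [str(i) * (food[i] // 2) for i in range(1, len(food))]
--     asc = ''.join(parts)
--     cnt = {}
--     for ch in asc:
--         cnt[ch] = cnt.get(ch, 0) + 1
--     desc = ''.join(str(d) * cnt.get(str(d), 0) for d in range(9, -1, -1))
--     return asc + '0' + desc
-- ===== Notes on version B (the rewrite author's own statement) =====
-- stated objective: faster
-- what changed: The descending half is produced by a counting sort (one dict-counting pass over the digit string, then emitting digits 9..0 by their counts) instead of comparison-sorting the character list; the ascending half is built by a join of per-index repeated strings instead of character-by-character concatenation.
import Mathlib
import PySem

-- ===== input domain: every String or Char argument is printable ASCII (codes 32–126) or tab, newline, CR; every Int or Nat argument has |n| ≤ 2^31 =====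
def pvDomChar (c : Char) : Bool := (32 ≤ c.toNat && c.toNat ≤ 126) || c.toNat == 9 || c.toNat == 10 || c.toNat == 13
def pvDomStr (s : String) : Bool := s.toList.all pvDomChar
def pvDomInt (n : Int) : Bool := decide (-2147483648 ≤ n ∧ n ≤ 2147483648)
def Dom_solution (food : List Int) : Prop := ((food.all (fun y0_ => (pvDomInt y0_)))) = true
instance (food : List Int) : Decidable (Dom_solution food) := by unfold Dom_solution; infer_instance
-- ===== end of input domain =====

-- B replaces A's comparison sort of the digit string by a counting sort over the
-- ten digit characters (one dictionary-counting pass, then emit 9..0), making the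
-- descending half linear instead of O(M log M).

-- ===== PORT A =====
-- Strings are ported as List Char and packed with String.ofList at the end (Lean's own
-- String.append is kernel-opaque). pyGetD's default 0 is never used: i ranges over
-- 1..len(food)-1, always a valid index.
def solution (food : List Int) : String :=
  let answer1 : List Char :=
    (PySem.List.pyRange 1 (food.length : Int) 1).foldl (fun a1 i =>
      (PySem.List.pyRange 0 (PySem.Int.floordiv (PySem.List.pyGetD food i 0) 2) 1).foldl
        (fun a1 _ => a1 ++ PySem.Int.toChars i) a1) []
  let answer2 : List Char := PySem.List.sorted answer1 (fun c => c) true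
  String.ofList ((answer1 ++ PySem.Int.toChars 0) ++ answer2)

-- ===== PORT B =====
-- Python's iteration over a str yields 1-char strings, hence the dict keys are the
-- singleton lists [c]; str(i) * k is List.replicate k.toNat (toChars i) flattened
-- (Python's negative repeat count gives '', as Int.toNat does).
def solution_alt (food : List Int) : String :=
  let parts : List (List Char) :=
    (PySem.List.pyRange 1 (food.length : Int) 1).map (fun i =>
      (List.replicate (PySem.Int.floordiv (PySem.List.pyGetD food i 0) 2).toNat
        (PySem.Int.toChars i)).flatten)
  let asc : List Char := PySem.Chars.join [] parts
  let cnt : PySem.Dict (List Char) Int :=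
    (asc.map (fun c => [c])).foldl (fun d ch => d.insert ch (d.getD ch 0 + 1)) PySem.Dict.empty
  let desc : List Char := PySem.Chars.join [] ((PySem.List.pyRange 9 (-1) (-1)).map (fun dd =>
      (List.replicate (cnt.getD (PySem.Int.toChars dd) 0).toNat (PySem.Int.toChars dd)).flatten))
  String.ofList ((asc ++ PySem.Int.toChars 0) ++ desc)

-- ===== PRECONDITION & SPEC =====
def Spec_solution (food : List Int) (out : String) : Prop := out = solution_alt food
instance (food : List Int) (out : String) : Decidable (Spec_solution food out) := by unfold Spec_solution; infer_instance

-- ===== CLAIM (what is proved, stated in full; the proofs are below) =====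
def Claim_equal_solution : Prop := ∀ (food : List Int), Dom_solution food → Spec_solution food (solution food)

-- ===== LEMMAS AND PROOFS =====

-- the ten decimal digit characters, ascending and descending
def pvDIGITS : List Char := ['0','1','2','3','4','5','6','7','8','9']
def pvDESC : List Char := ['9','8','7','6','5','4','3','2','1','0']

theorem pv_digitChar_mem (m : Nat) (h : m < 10) : Nat.digitChar m ∈ pvDIGITS := by
  interval_cases m <;> decide

theorem pv_mem_toDigitsCore : ∀ (f n : Nat) (acc : List Char) (c : Char),
    c ∈ Nat.toDigitsCore 10 f n acc → c ∈ acc ∨ c ∈ pvDIGITS := by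
  intro f
  induction f with
  | zero => intro n acc c h; simp [Nat.toDigitsCore] at h; exact Or.inl h
  | succ f ih =>
    intro n acc c h
    rw [Nat.toDigitsCore] at h
    by_cases h0 : n / 10 = 0
    · simp [h0] at h
      rcases h with h | h
      · exact Or.inr (h ▸ pv_digitChar_mem _ (Nat.mod_lt _ (by norm_num)))
      · exact Or.inl h
    · simp [h0] at h
      rcases ih _ _ _ h with h' | h'
      · rcases List.mem_cons.mp h' with h' | h'
        · exact Or.inr (h' ▸ pv_digitChar_mem _ (Nat.mod_lt _ (by norm_num)))
        · exact Or.inl h'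
      · exact Or.inr h'

theorem pv_mem_toChars (n : Int) (hn : 0 ≤ n) (c : Char) (h : c ∈ PySem.Int.toChars n) :
    c ∈ pvDIGITS := by
  unfold PySem.Int.toChars at h
  rw [if_neg (by omega)] at h
  rcases pv_mem_toDigitsCore _ _ _ _ h with h' | h'
  · simp at h'
  · exact h'

theorem pv_flatten_rep (k : Nat) (c : Char) : (List.replicate k [c]).flatten = List.replicate k c := by
  induction k with
  | zero => rfl
  | succ k ih => simp [List.replicate_succ, ih]

theorem pv_flatten_intersperse_nil (l : List (List Char)) :
    (List.intersperse ([] : List Char) l).flatten = l.flatten := by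
  induction l with
  | nil => rfl
  | cons a t ih =>
    cases t with
    | nil => rfl
    | cons b t' => rw [List.intersperse_cons₂]; simp_all

theorem pv_join_nil (parts : List (List Char)) : PySem.Chars.join [] parts = parts.flatten := by
  simp [PySem.Chars.join, List.intercalate, pv_flatten_intersperse_nil]

theorem pv_foldl_const_append {β : Type} (l : List β) (acc cs : List Char) :
    l.foldl (fun a _ => a ++ cs) acc = acc ++ (List.replicate l.length cs).flatten := by
  induction l generalizing acc with
  | nil => simp
  | cons x t ih => simp [List.foldl_cons, ih, List.replicate_succ]

theorem pv_len_pyRange_zero (m : Int) : (PySem.List.pyRange 0 m 1).length = m.toNat := by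
  rcases (by omega : 0 ≤ m ∨ m < 0) with h | h
  · obtain ⟨n, rfl⟩ := Int.eq_ofNat_of_zero_le h
    rw [show PySem.List.pyRange 0 (n:Int) 1 = PySem.List.pyRange 0 (n:Int) from rfl,
      PySem.List.pyRange_zero_natCast]
    simp
  · have he : PySem.List.pyRange 0 m 1 = [] := by
      apply List.eq_nil_iff_forall_not_mem.mpr
      intro x hx
      have := PySem.List.mem_pyRange_one.mp hx
      omega
    rw [he]; simp; omega

-- A's nested append loop builds exactly the flatten-of-replicates string
theorem pv_outer (f : Int → Int) (g : Int → List Char) (l : List Int) (acc : List Char) :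
    l.foldl (fun a1 i => (PySem.List.pyRange 0 (f i) 1).foldl (fun a _ => a ++ g i) a1) acc
      = acc ++ (l.map (fun i => (List.replicate (f i).toNat (g i)).flatten)).flatten := by
  have hb : (fun (a1 : List Char) (i : Int) =>
      (PySem.List.pyRange 0 (f i) 1).foldl (fun a _ => a ++ g i) a1)
      = fun a1 i => a1 ++ (List.replicate (f i).toNat (g i)).flatten := by
    funext a1 i
    rw [pv_foldl_const_append, pv_len_pyRange_zero]
  rw [hb, PySem.List.foldl_append_eq_flatMap]
  simp [List.flatMap_def]

-- descending blocks of equal characters are pairwise ≥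
theorem pv_pairwise_desc (ds : List Char) (k : Char → Nat) (h : ds.Pairwise (fun a b => b < a)) :
    ((ds.map (fun c => List.replicate (k c) c)).flatten).Pairwise (fun a b : Char => b ≤ a) := by
  rw [List.pairwise_flatten]
  refine ⟨?_, ?_⟩
  · intro l hl
    simp only [List.mem_map] at hl
    obtain ⟨c, _, rfl⟩ := hl
    exact List.pairwise_replicate.mpr (Or.inr le_rfl)
  · rw [List.pairwise_map]
    refine h.imp ?_
    intro a b hab x hx y hy
    rw [List.eq_of_mem_replicate hx, List.eq_of_mem_replicate hy]
    exact le_of_lt hab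

-- a list of digit characters is a permutation of its counting-sort rearrangement
theorem pv_count_blocks (asc : List Char) (h : ∀ c ∈ asc, c ∈ pvDIGITS) :
    asc.Perm ((pvDESC.map (fun c => List.replicate (asc.count c) c)).flatten) := by
  rw [List.perm_iff_count]
  intro a
  by_cases ha : a ∈ pvDIGITS
  · simp only [pvDIGITS, List.mem_cons, List.not_mem_nil, or_false] at ha
    rcases ha with rfl | rfl | rfl | rfl | rfl | rfl | rfl | rfl | rfl | rfl <;>
      simp [pvDESC, List.count_append, List.count_replicate]
  · have h0 : asc.count a = 0 := List.count_eq_zero_of_not_mem (fun hm => ha (h a hm))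
    rw [h0]
    have hne : a ≠ '9' ∧ a ≠ '8' ∧ a ≠ '7' ∧ a ≠ '6' ∧ a ≠ '5' ∧ a ≠ '4' ∧ a ≠ '3' ∧
        a ≠ '2' ∧ a ≠ '1' ∧ a ≠ '0' := by
      simp only [pvDIGITS, List.mem_cons, List.not_mem_nil, or_false] at ha
      push Not at ha
      tauto
    obtain ⟨h9,h8,h7,h6,h5,h4,h3,h2,h1,hz⟩ := hne
    simp [pvDESC, List.count_append, List.count_replicate,
      Ne.symm h9, Ne.symm h8, Ne.symm h7, Ne.symm h6, Ne.symm h5, Ne.symm h4,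
      Ne.symm h3, Ne.symm h2, Ne.symm h1, Ne.symm hz]

-- ===== VERDICT (by name: the statement is the Claim_ definition above) =====
theorem solution_spec : Claim_equal_solution := by
  intro food _
  simp only [Spec_solution, solution, solution_alt]
  rw [pv_outer, pv_join_nil, List.nil_append]
  set ASC : List Char :=
    ((PySem.List.pyRange 1 (food.length : Int) 1).map (fun i =>
      (List.replicate (PySem.Int.floordiv (PySem.List.pyGetD food i 0) 2).toNat
        (PySem.Int.toChars i)).flatten)).flatten with hASC
  have hdig : ∀ c ∈ ASC, c ∈ pvDIGITS := by
    intro c hc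
    rw [hASC] at hc
    simp only [List.mem_flatten, List.mem_map] at hc
    obtain ⟨l, ⟨i, hi, rfl⟩, hcl⟩ := hc
    simp only [List.mem_flatten] at hcl
    obtain ⟨l', hl', hcl'⟩ := hcl
    rw [List.eq_of_mem_replicate hl'] at hcl'
    exact pv_mem_toChars i (by have := PySem.List.mem_pyRange_one.mp hi; omega) c hcl'
  have hcnt : ∀ c : Char,
      ((ASC.map (fun c => [c])).foldl
        (fun d ch => d.insert ch (d.getD ch 0 + 1)) PySem.Dict.empty).getD [c] 0
        = (ASC.count c : Int) := by
    intro c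
    rw [PySem.Dict.getD_foldl_insert_add_one, PySem.Dict.getD_empty,
      List.count_map_of_injective ASC (fun c => [c])
        (fun a b hab => by simpa using hab) c]
    simp
  rw [show PySem.List.pyRange 9 (-1) (-1) = [9,8,7,6,5,4,3,2,1,0] from by decide]
  simp only [List.map_cons, List.map_nil]
  rw [show PySem.Int.toChars 9 = ['9'] from rfl, show PySem.Int.toChars 8 = ['8'] from rfl,
    show PySem.Int.toChars 7 = ['7'] from rfl, show PySem.Int.toChars 6 = ['6'] from rfl,
    show PySem.Int.toChars 5 = ['5'] from rfl, show PySem.Int.toChars 4 = ['4'] from rfl,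
    show PySem.Int.toChars 3 = ['3'] from rfl, show PySem.Int.toChars 2 = ['2'] from rfl,
    show PySem.Int.toChars 1 = ['1'] from rfl, show PySem.Int.toChars 0 = ['0'] from rfl,
    hcnt '9', hcnt '8', hcnt '7', hcnt '6', hcnt '5', hcnt '4', hcnt '3', hcnt '2',
    hcnt '1', hcnt '0']
  simp only [Int.toNat_natCast, pv_flatten_rep]
  have hsorted : PySem.List.sorted ASC (fun c => c) true
      = ((pvDESC.map (fun c => List.replicate (ASC.count c) c)).flatten) := by
    refine List.Perm.eq_of_pairwise (le := fun a b : Char => b ≤ a)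
      (fun a b _ _ hab hba => le_antisymm hba hab) ?_ ?_ ?_
    · exact PySem.List.sorted_pairwise_rev ASC (fun c => c)
    · exact pv_pairwise_desc pvDESC (fun c => ASC.count c) (by decide)
    · exact (PySem.List.sorted_perm ASC (fun c => c) true).trans (pv_count_blocks ASC hdig)
  rw [hsorted, pv_join_nil]
  simp [pvDESC]
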